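-- pv_equiv track=rewrite | github.com/QJF-347/Ai | maze_solving/maze_solver.py | bfs
-- ===== SOURCE A (Python) =====
-- from collections import deque
--
-- def bfs(maze, start, goal):
--     rows, cols = len(maze), len(maze[0])
--     queue = deque([start])
--     visited = set()
--     came_from = {}  # This will store the path (the predecessor of each node)
--
--     directions = [(0, 1), (1, 0), (-1, 0), (0, -1)]  # right, down, up, left
--
--     while queue:
--         current = queue.popleft()  # BFS: first in, first out
--
--         if current == goal:
--             # If goal is reached, reconstruct the path
--             path = []
--             while current in came_from:
--                 path.append(current)
--                 current = came_from[current]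
--             path.append(start)
--             return path[::-1], visited  # Return the complete path from start to goal
--
--         visited.add(current)
--
--         # Explore neighbors
--         for direction in directions:
--             neighbor = (current[0] + direction[0], current[1] + direction[1])
--
--             if (0 <= neighbor[0] < rows and 0 <= neighbor[1] < cols and
--                 maze[neighbor[0]][neighbor[1]] != '1' and neighbor not in visited):
--
--                 queue.append(neighbor)
--                 visited.add(neighbor)
--                 came_from[neighbor] = current  # Track the predecessor of the neighbor
--
--         # For progress visualization/debugging, yield the current path from start to current node
--         path = []
--         temp = current
--         while temp in came_from:
--             path.append(temp)
--             temp = came_from[temp]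
--         path.append(start)
--         yield path[::-1], visited  # Yield the current partial path for visualization
-- ===== SOURCE B (Python) =====
-- def bfs(maze, start, goal):
--     # Level-by-level BFS: the frontier of one level carries (node, path) pairs;
--     # no deque, no predecessor dict, no path reconstruction. The yielded
--     # `visited` is the same shared set as in A.
--     rows, cols = len(maze), len(maze[0])
--     visited = set()
--     frontier = [(start, [start])]
--     while frontier:
--         nxt = []
--         for node, path in frontier:
--             if node == goal:
--                 return path, visited
--             visited.add(node)
--             for nb in ((node[0], node[1] + 1), (node[0] + 1, node[1]),
--                        (node[0] - 1, node[1]), (node[0], node[1] - 1)):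
--                 if (0 <= nb[0] < rows and 0 <= nb[1] < cols and
--                         maze[nb[0]][nb[1]] != '1' and nb not in visited):
--                     visited.add(nb)
--                     nxt.append((nb, path + [nb]))
--             yield path, visited
--         frontier = nxt
-- ===== Notes on version B (the rewrite author's own statement) =====
-- stated objective: alternative
-- what changed: Replaces the deque + predecessor-pointer dict + per-iteration backward path reconstruction with a level-by-level frontier BFS that carries each node's start-to-node path in the frontier, so no deque, no came_from dict and no reconstruction loops exist at all.
import Mathlib
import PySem

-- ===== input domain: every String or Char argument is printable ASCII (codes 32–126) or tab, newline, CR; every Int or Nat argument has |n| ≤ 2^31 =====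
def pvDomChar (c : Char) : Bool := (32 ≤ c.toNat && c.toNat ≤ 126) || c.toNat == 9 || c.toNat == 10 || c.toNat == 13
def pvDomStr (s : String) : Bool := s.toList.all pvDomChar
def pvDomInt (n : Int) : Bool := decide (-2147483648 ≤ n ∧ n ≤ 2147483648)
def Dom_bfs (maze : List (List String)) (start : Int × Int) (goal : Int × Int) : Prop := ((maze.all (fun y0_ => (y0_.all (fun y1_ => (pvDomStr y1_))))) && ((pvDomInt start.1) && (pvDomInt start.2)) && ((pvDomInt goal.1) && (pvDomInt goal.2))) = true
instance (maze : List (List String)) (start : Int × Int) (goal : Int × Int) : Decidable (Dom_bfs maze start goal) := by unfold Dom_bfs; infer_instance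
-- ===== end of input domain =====

-- B is a level-by-level (frontier) BFS carrying each node's start→node path in the frontier,
-- replacing A's single deque + predecessor dict + per-iteration backward path reconstruction;
-- equivalence is about the list of yielded values as list() observes it (both generators yield
-- the ONE shared `visited` set, mutated in place, so every collected entry shows the final set —
-- both ports pair each yielded path with it).

-- ===== PORT A =====
-- `directions` list of A
def bfsDirs : List (Int × Int) := [(0, 1), (1, 0), (-1, 0), (0, -1)]

-- A's neighbor test: bounds, not a wall, unvisited
def bfsOk (maze : List (List String)) (rows cols : Int) (vis : PySem.Set (Int × Int))
    (nb : Int × Int) : Bool :=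
  decide (0 ≤ nb.1) && decide (nb.1 < rows) && decide (0 ≤ nb.2) && decide (nb.2 < cols) &&
    !(PySem.List.pyGetD (PySem.List.pyGetD maze nb.1 []) nb.2 "" == "1") &&
    !(PySem.Set.contains vis nb)

-- A's `while current in came_from` reconstruction walk (fueled totality guard; the chain is
-- acyclic on every reachable dict, so `items.length + 1` fuel is never exhausted)
def bfsChain (d : PySem.Dict (Int × Int) (Int × Int)) :
    Nat → (Int × Int) → List (Int × Int)
  | 0, _ => []
  | fuel + 1, cur =>
    match PySem.Dict.get? d cur with
    | some prev => cur :: bfsChain d fuel prev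
    | none => []

-- `path.append(start); path[::-1]`
def bfsPathA (d : PySem.Dict (Int × Int) (Int × Int)) (start cur : Int × Int) :
    List (Int × Int) :=
  ((bfsChain d (d.items.length + 1) cur) ++ [start]).reverse

-- body of A's `for direction in directions` loop: state (queue, visited, came_from)
def bfsStepA (maze : List (List String)) (rows cols : Int) (cur : Int × Int)
    (st : List (Int × Int) × PySem.Set (Int × Int) × PySem.Dict (Int × Int) (Int × Int))
    (dir : Int × Int) :
    List (Int × Int) × PySem.Set (Int × Int) × PySem.Dict (Int × Int) (Int × Int) :=
  let nb : Int × Int := (cur.1 + dir.1, cur.2 + dir.2)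
  if bfsOk maze rows cols st.2.1 nb then
    (st.1 ++ [nb], PySem.Set.add st.2.1 nb, PySem.Dict.insert st.2.2 nb cur)
  else st

-- A's `while queue` loop, returning (yielded paths, final visited); fuel is a totality guard
def bfsLoopA (maze : List (List String)) (rows cols : Int) (start goal : Int × Int) :
    Nat → List (Int × Int) → PySem.Set (Int × Int) →
    PySem.Dict (Int × Int) (Int × Int) →
    (List (List (Int × Int)) × PySem.Set (Int × Int))
  | 0, _, vis, _ => ([], vis)
  | _ + 1, [], vis, _ => ([], vis)
  | fuel + 1, cur :: rest, vis, d =>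
    if cur = goal then ([], vis)  -- `return`: StopIteration, nothing more collected
    else
      let vis1 := PySem.Set.add vis cur
      let st := bfsDirs.foldl (bfsStepA maze rows cols cur) (rest, vis1, d)
      let res := bfsLoopA maze rows cols start goal fuel st.1 st.2.1 st.2.2
      (bfsPathA st.2.2 start cur :: res.1, res.2)

def bfs (maze : List (List String)) (start : Int × Int) (goal : Int × Int) :
    List ((List (Int × Int)) × (List (Int × Int))) :=
  let rows : Int := maze.length
  let cols : Int := (PySem.List.pyGetD maze 0 []).length
  let res := bfsLoopA maze rows cols start goal
    (maze.length * (PySem.List.pyGetD maze 0 []).length + 2) [start]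
    PySem.Set.empty PySem.Dict.empty
  res.1.map (fun p => (p, res.2))

-- ===== PORT B =====
-- B's literal tuple of the four neighbors of `node`
def bfsNbs (cur : Int × Int) : List (Int × Int) :=
  [(cur.1, cur.2 + 1), (cur.1 + 1, cur.2), (cur.1 - 1, cur.2), (cur.1, cur.2 - 1)]

-- B's inner `for nb in (...)` loop: collects accepted neighbors into `nxt`, marking them visited
def bfsScan (maze : List (List String)) (rows cols : Int) (path : List (Int × Int)) :
    List (Int × Int) → PySem.Set (Int × Int) → List ((Int × Int) × List (Int × Int)) →
    (List ((Int × Int) × List (Int × Int)) × PySem.Set (Int × Int))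
  | [], vis, nxt => (nxt, vis)
  | nb :: nbs, vis, nxt =>
    if 0 ≤ nb.1 ∧ nb.1 < rows ∧ 0 ≤ nb.2 ∧ nb.2 < cols ∧
        PySem.List.pyGetD (PySem.List.pyGetD maze nb.1 []) nb.2 "" ≠ "1" ∧
        ¬(PySem.Set.contains vis nb = true) then
      bfsScan maze rows cols path nbs (PySem.Set.add vis nb) (nxt ++ [(nb, path ++ [nb])])
    else
      bfsScan maze rows cols path nbs vis nxt

-- B's `for node, path in frontier` loop over ONE level: returns the yields of the level, the
-- visited set, and `none` (the generator returned at the goal / the totality fuel ran out) or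
-- `some (fuel left, next frontier)` (level finished)
def bfsLevel (maze : List (List String)) (rows cols : Int) (goal : Int × Int) :
    Nat → List ((Int × Int) × List (Int × Int)) → PySem.Set (Int × Int) →
    List ((Int × Int) × List (Int × Int)) →
    (List (List (Int × Int)) × PySem.Set (Int × Int) ×
      Option (Nat × List ((Int × Int) × List (Int × Int))))
  | fuel, [], vis, nxt => ([], vis, some (fuel, nxt))
  | 0, _ :: _, vis, _ => ([], vis, none)
  | fuel + 1, (cur, path) :: rest, vis, nxt =>
    if cur = goal then ([], vis, none)
    else
      let s := bfsScan maze rows cols path (bfsNbs cur) (PySem.Set.add vis cur) nxt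
      let res := bfsLevel maze rows cols goal fuel rest s.2 s.1
      (path :: res.1, res.2)

-- the level loop hands back strictly less fuel when the level was nonempty (termination of bfsLoopL)
theorem bfsLevel_fuel (maze : List (List String)) (rows cols : Int) (goal : Int × Int) :
    ∀ (front : List ((Int × Int) × List (Int × Int))) (fuel : Nat) vis nxt ys v f' n',
      bfsLevel maze rows cols goal fuel front vis nxt = (ys, v, some (f', n')) →
      f' ≤ fuel ∧ (front ≠ [] → f' < fuel) := by
  intro front
  induction front with
  | nil =>
    intro fuel vis nxt ys v f' n' h
    simp only [bfsLevel, Prod.mk.injEq, Option.some.injEq] at h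
    obtain ⟨-, -, h3, -⟩ := h
    subst h3
    exact ⟨Nat.le_refl _, fun hc => absurd rfl hc⟩
  | cons e rest ih =>
    intro fuel vis nxt ys v f' n' h
    match fuel with
    | 0 => simp [bfsLevel] at h
    | fuel + 1 =>
      obtain ⟨cur, path⟩ := e
      by_cases hg : cur = goal
      · simp [bfsLevel, hg] at h
      · rcases hrec : bfsLevel maze rows cols goal fuel rest
            (bfsScan maze rows cols path (bfsNbs cur) (PySem.Set.add vis cur) nxt).2
            (bfsScan maze rows cols path (bfsNbs cur) (PySem.Set.add vis cur) nxt).1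
          with ⟨ys', v', o'⟩
        simp only [bfsLevel, hg, if_neg, not_false_iff, hrec, Prod.mk.injEq] at h
        obtain ⟨-, -, h3⟩ := h
        subst h3
        have := (ih fuel _ _ _ _ _ _ hrec).1
        exact ⟨Nat.le_succ_of_le this, fun _ => Nat.lt_succ_of_le this⟩

-- B's `while frontier` loop
def bfsLoopL (maze : List (List String)) (rows cols : Int) (goal : Int × Int)
    (fuel : Nat) (front : List ((Int × Int) × List (Int × Int)))
    (vis : PySem.Set (Int × Int)) :
    (List (List (Int × Int)) × PySem.Set (Int × Int)) :=
  if hf : front = [] then ([], vis)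
  else
    match h : bfsLevel maze rows cols goal fuel front vis [] with
    | (ys, v, none) => (ys, v)
    | (ys, v, some (f', nxt)) =>
      let r := bfsLoopL maze rows cols goal f' nxt v
      (ys ++ r.1, r.2)
termination_by fuel
decreasing_by exact (bfsLevel_fuel maze rows cols goal front fuel vis [] ys v f' nxt h).2 hf

def bfs_alt (maze : List (List String)) (start : Int × Int) (goal : Int × Int) :
    List ((List (Int × Int)) × (List (Int × Int))) :=
  let rows : Int := maze.length
  let cols : Int := (PySem.List.pyGetD maze 0 []).length
  let res := bfsLoopL maze rows cols goal
    (maze.length * (PySem.List.pyGetD maze 0 []).length + 2) [(start, [start])]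
    PySem.Set.empty
  res.1.map (fun p => (p, res.2))

-- ===== PRECONDITION & SPEC =====
-- Pre_ excludes the empty maze (maze[0] raises IndexError at once) and ragged mazes — rows
-- shorter than len(maze[0]) — except when no cell can ever be read (start == goal, or all four
-- neighbors of start are out of bounds): on the remaining ragged mazes A raises IndexError
-- exactly when the search reads a short row, a reachability property, so that whole class is
-- excluded although A still returns when the short rows happen to be unreached (see cites).
def Pre_bfs (maze : List (List String)) (start : Int × Int) (goal : Int × Int) : Prop :=
  maze ≠ [] ∧
    ((∀ row ∈ maze, (maze.headD []).length ≤ row.length) ∨ start = goal ∨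
      ∀ nb ∈ [(start.1, start.2 + 1), (start.1 + 1, start.2),
          (start.1 - 1, start.2), (start.1, start.2 - 1)],
        ¬(0 ≤ nb.1 ∧ nb.1 < (maze.length : Int) ∧ 0 ≤ nb.2 ∧
          nb.2 < ((maze.headD []).length : Int)))
instance (maze : List (List String)) (start : Int × Int) (goal : Int × Int) :
    Decidable (Pre_bfs maze start goal) := by unfold Pre_bfs; infer_instance
def pvWitness_bfs : List (List String) × (Int × Int) × (Int × Int) :=
  ([["0", "0"], ["0", "1"]], (0, 0), (1, 0))

def Spec_bfs (maze : List (List String)) (start : Int × Int) (goal : Int × Int) (out : List ((List (Int × Int)) × (List (Int × Int)))) : Prop := out = bfs_alt maze start goal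
instance (maze : List (List String)) (start : Int × Int) (goal : Int × Int) (out : List ((List (Int × Int)) × (List (Int × Int)))) : Decidable (Spec_bfs maze start goal out) := by unfold Spec_bfs; infer_instance

-- ===== CLAIM (what is proved, stated in full; the proofs are below) =====
def Claim_equal_bfs : Prop := ∀ (maze : List (List String)) (start : Int × Int) (goal : Int × Int), Dom_bfs maze start goal → Pre_bfs maze start goal → Spec_bfs maze start goal (bfs maze start goal)

-- ===== LEMMAS AND PROOFS =====

-- proof-only intermediate M: a single queue of (node, path) pairs; A = M (simulation with an
-- ancestor invariant), M = L (the queue is the current level followed by the next one)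
def bfsStepB (maze : List (List String)) (rows cols : Int) (path : List (Int × Int))
    (st : List ((Int × Int) × List (Int × Int)) × PySem.Set (Int × Int))
    (nb : Int × Int) :
    List ((Int × Int) × List (Int × Int)) × PySem.Set (Int × Int) :=
  if bfsOk maze rows cols st.2 nb then
    (st.1 ++ [(nb, path ++ [nb])], PySem.Set.add st.2 nb)
  else st

def bfsLoopB (maze : List (List String)) (rows cols : Int) (goal : Int × Int) :
    Nat → List ((Int × Int) × List (Int × Int)) → PySem.Set (Int × Int) →
    (List (List (Int × Int)) × PySem.Set (Int × Int))
  | 0, _, vis => ([], vis)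
  | _ + 1, [], vis => ([], vis)
  | fuel + 1, (cur, path) :: rest, vis =>
    if cur = goal then ([], vis)
    else
      let vis1 := PySem.Set.add vis cur
      let st := (bfsNbs cur).foldl (bfsStepB maze rows cols path) (rest, vis1)
      let res := bfsLoopB maze rows cols goal fuel st.1 st.2
      (path :: res.1, res.2)

-- `l` lists the ancestors of `n` back to `start`: l = [n, parent n, …, start]
inductive bfsAnc (d : PySem.Dict (Int × Int) (Int × Int)) (start : Int × Int) :
    (Int × Int) → List (Int × Int) → Prop
  | base : PySem.Dict.get? d start = none → bfsAnc d start start [start]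
  | step {n m : Int × Int} {l : List (Int × Int)} :
      PySem.Dict.get? d n = some m → bfsAnc d start m l → bfsAnc d start n (n :: l)

theorem bfsAnc_chain {d : PySem.Dict (Int × Int) (Int × Int)} {start n : Int × Int}
    {l : List (Int × Int)} (h : bfsAnc d start n l) :
    ∀ fuel, l.length ≤ fuel → (bfsChain d fuel n ++ [start]).reverse = l.reverse := by
  induction h with
  | base h0 =>
    intro fuel hf
    match fuel, hf with
    | f + 1, _ => simp [bfsChain, h0]
  | step hget _ ih =>
    intro fuel hf
    match fuel, hf with
    | f + 1, hf =>
      have := ih f (by simp at hf; omega)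
      simp only [bfsChain, hget]
      rw [List.cons_append, List.reverse_cons, List.reverse_cons, this]

theorem bfsAnc_mem_keys {d : PySem.Dict (Int × Int) (Int × Int)} {start n : Int × Int}
    {l : List (Int × Int)} (h : bfsAnc d start n l) :
    ∀ x ∈ l, x = start ∨ x ∈ d.keys := by
  induction h with
  | base h0 => intro x hx; simp at hx; subst hx; exact Or.inl rfl
  | step hget _ ih =>
    intro x hx
    rcases List.mem_cons.mp hx with rfl | hx
    · refine Or.inr ?_
      by_contra hc
      rw [(PySem.Dict.get?_eq_none_iff_not_mem_keys _ _).mpr hc] at hget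
      simp at hget
    · exact ih x hx

theorem bfsAnc_insert {d : PySem.Dict (Int × Int) (Int × Int)} {start n k v : Int × Int}
    {l : List (Int × Int)} (h : bfsAnc d start n l) (hk : k ∉ l) :
    bfsAnc (PySem.Dict.insert d k v) start n l := by
  induction h with
  | base h0 =>
    exact bfsAnc.base (by rw [PySem.Dict.get?_insert_of_ne _ _ (by simp at hk; tauto)]; exact h0)
  | step hget hanc ih =>
    exact bfsAnc.step (by rw [PySem.Dict.get?_insert_of_ne _ _ (by simp at hk; tauto)]; exact hget)
      (ih (fun h => hk (List.mem_cons_of_mem _ h)))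

theorem bfsNodup_length_le {l L : List (Int × Int)} (h1 : l.Nodup) (h2 : l ⊆ L) :
    l.length ≤ L.length := by
  classical
  calc l.length = l.toFinset.card := (List.toFinset_card_of_nodup h1).symm
    _ ≤ L.toFinset.card :=
        Finset.card_le_card (fun x hx => List.mem_toFinset.mpr (h2 (List.mem_toFinset.mp hx)))
    _ ≤ L.length := L.toFinset_card_le

-- `bfsPathA` really recovers the carried path
theorem bfsPathA_eq {d : PySem.Dict (Int × Int) (Int × Int)} {start cur : Int × Int}
    {l : List (Int × Int)} (h : bfsAnc d start cur l) (hnd : l.Nodup) :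
    bfsPathA d start cur = l.reverse := by
  have hsub : l ⊆ start :: d.keys := by
    intro x hx
    rcases bfsAnc_mem_keys h x hx with rfl | hk
    · exact List.mem_cons_self
    · exact List.mem_cons_of_mem _ hk
  have hlen : l.length ≤ d.items.length + 1 := by
    have := bfsNodup_length_le hnd hsub
    simpa [PySem.Dict.keys] using this
  exact bfsAnc_chain h _ hlen

-- invariant tying one M-queue entry to A's came_from dict
def bfsEntryInv (d : PySem.Dict (Int × Int) (Int × Int)) (start : Int × Int)
    (vis : PySem.Set (Int × Int)) (e : (Int × Int) × List (Int × Int)) : Prop :=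
  ∃ l, bfsAnc d start e.1 l ∧ e.2 = l.reverse ∧ l.Nodup ∧ ∀ x ∈ l, x ∈ vis

-- the loop invariant (the freshly started loop is the right disjunct)
def bfsInv (start : Int × Int) (d : PySem.Dict (Int × Int) (Int × Int))
    (vis : PySem.Set (Int × Int)) (q : List ((Int × Int) × List (Int × Int))) : Prop :=
  PySem.Dict.get? d start = none ∧ (∀ k ∈ d.keys, k ∈ vis) ∧
    ((start ∈ vis ∧ ∀ e ∈ q, bfsEntryInv d start vis e) ∨
      (q = [(start, [start])] ∧ vis = PySem.Set.empty ∧ d = PySem.Dict.empty))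

-- invariant maintained through the neighbor fold (cur already added to vis)
def bfsFInv (start cur : Int × Int) (lcur : List (Int × Int))
    (d : PySem.Dict (Int × Int) (Int × Int)) (vis : PySem.Set (Int × Int))
    (q : List ((Int × Int) × List (Int × Int))) : Prop :=
  start ∈ vis ∧ PySem.Dict.get? d start = none ∧ (∀ k ∈ d.keys, k ∈ vis) ∧
    (∀ e ∈ q, bfsEntryInv d start vis e) ∧
    bfsAnc d start cur lcur ∧ lcur.Nodup ∧ (∀ x ∈ lcur, x ∈ vis)

theorem bfs_fold_rel (maze : List (List String)) (rows cols : Int) (start cur : Int × Int)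
    (lcur path : List (Int × Int)) (hpath : path = lcur.reverse) :
    ∀ (ds : List (Int × Int)) (q : List ((Int × Int) × List (Int × Int)))
      (vis : PySem.Set (Int × Int)) (d : PySem.Dict (Int × Int) (Int × Int)),
      bfsFInv start cur lcur d vis q →
      (ds.foldl (bfsStepA maze rows cols cur) (q.map Prod.fst, vis, d)).1 =
          ((ds.map (fun dir => (cur.1 + dir.1, cur.2 + dir.2))).foldl
            (bfsStepB maze rows cols path) (q, vis)).1.map Prod.fst ∧
        (ds.foldl (bfsStepA maze rows cols cur) (q.map Prod.fst, vis, d)).2.1 =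
          ((ds.map (fun dir => (cur.1 + dir.1, cur.2 + dir.2))).foldl
            (bfsStepB maze rows cols path) (q, vis)).2 ∧
        bfsFInv start cur lcur
          (ds.foldl (bfsStepA maze rows cols cur) (q.map Prod.fst, vis, d)).2.2
          ((ds.map (fun dir => (cur.1 + dir.1, cur.2 + dir.2))).foldl
            (bfsStepB maze rows cols path) (q, vis)).2
          ((ds.map (fun dir => (cur.1 + dir.1, cur.2 + dir.2))).foldl
            (bfsStepB maze rows cols path) (q, vis)).1 := by
  intro ds
  induction ds with
  | nil => intro q vis d hI; exact ⟨rfl, rfl, hI⟩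
  | cons dir ds ih =>
    intro q vis d hI
    obtain ⟨hs, hg0, hkeys, hq, hanc, hnd, hlv⟩ := hI
    simp only [List.map_cons, List.foldl_cons]
    by_cases hg : bfsOk maze rows cols vis ((cur.1 + dir.1, cur.2 + dir.2)) = true
    · -- neighbor accepted: both sides append / add / (A) insert
      have hnb : (cur.1 + dir.1, cur.2 + dir.2) ∉ vis := by
        have := hg
        simp only [bfsOk, Bool.and_eq_true, Bool.not_eq_true'] at this
        have hc := this.2
        simp only [PySem.Set.contains] at hc
        intro hmem
        rw [Bool.eq_false_iff] at hc
        exact hc (List.contains_iff_exists_mem_beq.mpr ⟨_, hmem, by simp⟩)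
      have hnbs : (cur.1 + dir.1, cur.2 + dir.2) ≠ start := fun h => hnb (h ▸ hs)
      have hnbl : (cur.1 + dir.1, cur.2 + dir.2) ∉ lcur := fun h => hnb (hlv _ h)
      simp only [bfsStepA, bfsStepB, hg, if_pos]
      have := ih (q ++ [((cur.1 + dir.1, cur.2 + dir.2), path ++ [(cur.1 + dir.1, cur.2 + dir.2)])])
          (PySem.Set.add vis (cur.1 + dir.1, cur.2 + dir.2))
          (PySem.Dict.insert d (cur.1 + dir.1, cur.2 + dir.2) cur) ?_
      · simpa using this
      · refine ⟨(PySem.Set.mem_add _ _ _).mpr (Or.inl hs), ?_, ?_, ?_, ?_, hnd, ?_⟩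
        · rw [PySem.Dict.get?_insert_of_ne _ _ (Ne.symm hnbs)]; exact hg0
        · intro k hk
          rcases (PySem.Dict.mem_keys_insert _ _ _ _).mp hk with rfl | hk'
          · exact (PySem.Set.mem_add _ _ _).mpr (Or.inr rfl)
          · exact (PySem.Set.mem_add _ _ _).mpr (Or.inl (hkeys _ hk'))
        · intro e he
          rcases List.mem_append.mp he with he' | he'
          · obtain ⟨l, hl1, hl2, hl3, hl4⟩ := hq e he'
            refine ⟨l, bfsAnc_insert hl1 (fun h => hnb (hl4 _ h)), hl2, hl3,
              fun x hx => (PySem.Set.mem_add _ _ _).mpr (Or.inl (hl4 x hx))⟩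
          · have he2 : e = ((cur.1 + dir.1, cur.2 + dir.2),
                path ++ [(cur.1 + dir.1, cur.2 + dir.2)]) := by simpa using he'
            subst he2
            refine ⟨(cur.1 + dir.1, cur.2 + dir.2) :: lcur,
              bfsAnc.step (PySem.Dict.get?_insert_self _ _ _) (bfsAnc_insert hanc hnbl),
              by simp [hpath], List.nodup_cons.mpr ⟨hnbl, hnd⟩, ?_⟩
            intro x hx
            rcases List.mem_cons.mp hx with rfl | hx'
            · exact (PySem.Set.mem_add _ _ _).mpr (Or.inr rfl)
            · exact (PySem.Set.mem_add _ _ _).mpr (Or.inl (hlv _ hx'))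
        · exact bfsAnc_insert hanc hnbl
        · exact fun x hx => (PySem.Set.mem_add _ _ _).mpr (Or.inl (hlv x hx))
    · -- neighbor rejected: both states unchanged
      simp only [bfsStepA, bfsStepB, hg, if_neg, Bool.false_eq_true, not_false_iff]
      exact ih q vis d ⟨hs, hg0, hkeys, hq, hanc, hnd, hlv⟩

theorem bfsNbs_eq_map (cur : Int × Int) :
    bfsNbs cur = bfsDirs.map (fun dir => (cur.1 + dir.1, cur.2 + dir.2)) := by
  simp [bfsNbs, bfsDirs, sub_eq_add_neg]

theorem bfs_loop_eq (maze : List (List String)) (rows cols : Int) (start goal : Int × Int) :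
    ∀ (fuel : Nat) (q : List ((Int × Int) × List (Int × Int))) vis d,
      bfsInv start d vis q →
      bfsLoopA maze rows cols start goal fuel (q.map Prod.fst) vis d =
        bfsLoopB maze rows cols goal fuel q vis := by
  intro fuel
  induction fuel with
  | zero => intro q vis d _; rfl
  | succ fuel ih =>
    intro q vis d hI
    match q with
    | [] => rfl
    | (cur, path) :: rest =>
      simp only [List.map_cons, bfsLoopA, bfsLoopB]
      by_cases hgoal : cur = goal
      · simp [hgoal]
      · simp only [hgoal, if_neg, not_false_iff]
        -- establish the fold invariant (two ways, depending on the bfsInv disjunct)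
        obtain ⟨hg0, hkeys, hcase⟩ := hI
        have hstep : ∃ lcur, path = lcur.reverse ∧
            bfsFInv start cur lcur d (PySem.Set.add vis cur) rest := by
          rcases hcase with ⟨hs, hq⟩ | ⟨hq, hv, hd⟩
          · obtain ⟨l, hl1, hl2, hl3, hl4⟩ := hq (cur, path) List.mem_cons_self
            refine ⟨l, hl2, (PySem.Set.mem_add _ _ _).mpr (Or.inl hs), hg0,
              fun k hk => (PySem.Set.mem_add _ _ _).mpr (Or.inl (hkeys k hk)), ?_, hl1, hl3,
              fun x hx => (PySem.Set.mem_add _ _ _).mpr (Or.inl (hl4 x hx))⟩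
            intro e he
            obtain ⟨l', h1, h2, h3, h4⟩ := hq e (List.mem_cons_of_mem _ he)
            exact ⟨l', h1, h2, h3, fun x hx => (PySem.Set.mem_add _ _ _).mpr (Or.inl (h4 x hx))⟩
          · simp only [List.cons.injEq, Prod.mk.injEq] at hq
            obtain ⟨⟨h1, hp⟩, hrest⟩ := hq
            subst h1; subst hrest; subst hv; subst hd
            exact ⟨[cur], by simp [hp],
              (PySem.Set.mem_add _ _ _).mpr (Or.inr rfl), PySem.Dict.get?_empty _,
              by simp [PySem.Dict.keys_empty], by simp,
              bfsAnc.base (PySem.Dict.get?_empty _), by simp,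
              fun x hx => by
                simp at hx; subst hx; exact (PySem.Set.mem_add _ _ _).mpr (Or.inr rfl)⟩
        obtain ⟨lcur, hpath, hF⟩ := hstep
        have hfold := bfs_fold_rel maze rows cols start cur lcur path hpath bfsDirs rest
          (PySem.Set.add vis cur) d hF
        rw [bfsNbs_eq_map]
        obtain ⟨hq', hvis', hF'⟩ := hfold
        obtain ⟨hs2, hg02, hkeys2, hqs2, hanc2, hnd2, _⟩ := hF'
        have hrec := ih _ _ _ ⟨hg02, hkeys2, Or.inl ⟨hs2, hqs2⟩⟩
        rw [hq', hvis']
        rw [hrec, bfsPathA_eq hanc2 hnd2, ← hpath]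

-- B's inline neighbor test is A's bfsOk
theorem bfsOk_iff (maze : List (List String)) (rows cols : Int)
    (vis : PySem.Set (Int × Int)) (nb : Int × Int) :
    bfsOk maze rows cols vis nb = true ↔
      (0 ≤ nb.1 ∧ nb.1 < rows ∧ 0 ≤ nb.2 ∧ nb.2 < cols ∧
        PySem.List.pyGetD (PySem.List.pyGetD maze nb.1 []) nb.2 "" ≠ "1" ∧
        ¬(PySem.Set.contains vis nb = true)) := by
  simp [bfsOk, and_assoc]

-- bfsScan is the foldl of bfsStepB
theorem bfsScan_eq_foldl (maze : List (List String)) (rows cols : Int)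
    (path : List (Int × Int)) :
    ∀ (nbs : List (Int × Int)) (vis : PySem.Set (Int × Int))
      (nxt : List ((Int × Int) × List (Int × Int))),
      bfsScan maze rows cols path nbs vis nxt =
        nbs.foldl (bfsStepB maze rows cols path) (nxt, vis) := by
  intro nbs
  induction nbs with
  | nil => intro vis nxt; rfl
  | cons nb nbs ih =>
    intro vis nxt
    by_cases h : (0 ≤ nb.1 ∧ nb.1 < rows ∧ 0 ≤ nb.2 ∧ nb.2 < cols ∧
        PySem.List.pyGetD (PySem.List.pyGetD maze nb.1 []) nb.2 "" ≠ "1" ∧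
        ¬(PySem.Set.contains vis nb = true))
    · have hok : bfsOk maze rows cols vis nb = true := (bfsOk_iff _ _ _ _ _).mpr h
      simp only [bfsScan, List.foldl_cons, bfsStepB]
      rw [if_pos h, if_pos hok]
      exact ih _ _
    · have hok : ¬ bfsOk maze rows cols vis nb = true :=
        fun hc => h ((bfsOk_iff _ _ _ _ _).mp hc)
      simp only [bfsScan, List.foldl_cons, bfsStepB]
      rw [if_neg h, if_neg hok]
      exact ih _ _

-- appending to the queue commutes with a fixed prefix
theorem bfs_foldl_stepB_append (maze : List (List String)) (rows cols : Int)
    (path : List (Int × Int)) :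
    ∀ (nbs : List (Int × Int)) (xs ys : List ((Int × Int) × List (Int × Int)))
      (vis : PySem.Set (Int × Int)),
      nbs.foldl (bfsStepB maze rows cols path) (xs ++ ys, vis) =
        (xs ++ (nbs.foldl (bfsStepB maze rows cols path) (ys, vis)).1,
          (nbs.foldl (bfsStepB maze rows cols path) (ys, vis)).2) := by
  intro nbs
  induction nbs with
  | nil => intro xs ys vis; rfl
  | cons nb nbs ih =>
    intro xs ys vis
    simp only [List.foldl_cons, bfsStepB]
    by_cases h : bfsOk maze rows cols vis nb = true
    · rw [if_pos h, if_pos h]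
      simp only [List.append_assoc]
      exact ih xs _ _
    · rw [if_neg h, if_neg h]
      exact ih xs ys vis

-- M on (level ++ next) is: run the level, then continue on the next frontier
theorem bfs_level_rel (maze : List (List String)) (rows cols : Int) (goal : Int × Int) :
    ∀ (front nxt : List ((Int × Int) × List (Int × Int))) (fuel : Nat)
      (vis : PySem.Set (Int × Int)),
      bfsLoopB maze rows cols goal fuel (front ++ nxt) vis =
        (match bfsLevel maze rows cols goal fuel front vis nxt with
          | (ys, v, none) => (ys, v)
          | (ys, v, some (f', n')) =>
            (ys ++ (bfsLoopB maze rows cols goal f' n' v).1,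
              (bfsLoopB maze rows cols goal f' n' v).2)) := by
  intro front
  induction front with
  | nil => intro nxt fuel vis; simp [bfsLevel]
  | cons e rest ih =>
    intro nxt fuel vis
    obtain ⟨cur, path⟩ := e
    match fuel with
    | 0 => simp [bfsLevel, bfsLoopB]
    | fuel + 1 =>
      by_cases hg : cur = goal
      · simp [bfsLevel, bfsLoopB, hg]
      · simp only [List.cons_append, bfsLoopB, bfsLevel, hg, if_neg, not_false_iff]
        rw [bfsScan_eq_foldl,
          bfs_foldl_stepB_append maze rows cols path (bfsNbs cur) rest nxt
            (PySem.Set.add vis cur)]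
        dsimp only
        rw [ih]
        rcases hL : bfsLevel maze rows cols goal fuel rest
            ((bfsNbs cur).foldl (bfsStepB maze rows cols path)
              (nxt, PySem.Set.add vis cur)).2
            ((bfsNbs cur).foldl (bfsStepB maze rows cols path)
              (nxt, PySem.Set.add vis cur)).1 with ⟨ys', v', o'⟩
        rcases o' with _ | ⟨f', n'⟩ <;> simp

-- M = L (strong induction on fuel; a nonempty level strictly consumes fuel)
theorem bfs_loopB_eq_loopL (maze : List (List String)) (rows cols : Int) (goal : Int × Int) :
    ∀ (fuel : Nat) (front : List ((Int × Int) × List (Int × Int)))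
      (vis : PySem.Set (Int × Int)),
      bfsLoopB maze rows cols goal fuel front vis =
        bfsLoopL maze rows cols goal fuel front vis := by
  intro fuel
  induction fuel using Nat.strong_induction_on with
  | _ fuel ih =>
    intro front vis
    rw [bfsLoopL]
    by_cases hf : front = []
    · subst hf
      simp only [dif_pos]
      match fuel with
      | 0 => rfl
      | _ + 1 => rfl
    · simp only [hf, dif_neg, not_false_iff]
      have hrel := bfs_level_rel maze rows cols goal front [] fuel vis
      rw [List.append_nil] at hrel
      split
      · rename_i ys v h
        rw [h] at hrel
        simpa using hrel
      · rename_i ys v f' n' h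
        rw [h] at hrel
        dsimp only at hrel
        have hlt : f' < fuel :=
          (bfsLevel_fuel maze rows cols goal front fuel vis [] ys v f' n' h).2 hf
        rw [ih f' hlt n' v] at hrel
        exact hrel

-- ===== VERDICT (by name: the statement is the Claim_ definition above) =====
theorem bfs_spec : Claim_equal_bfs := by
  intro maze start goal _ _
  unfold Spec_bfs bfs bfs_alt
  simp only []
  have h := bfs_loop_eq maze (maze.length : Int) ((PySem.List.pyGetD maze 0 []).length : Int)
    start goal (maze.length * (PySem.List.pyGetD maze 0 []).length + 2)
    [(start, [start])] PySem.Set.empty PySem.Dict.empty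
    ⟨PySem.Dict.get?_empty _, by simp [PySem.Dict.keys_empty], Or.inr ⟨rfl, rfl, rfl⟩⟩
  simp only [List.map_cons, List.map_nil] at h
  rw [h, bfs_loopB_eq_loopL]
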